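-- pv_equiv track=rewrite | github.com/umeshksingla/MouseMazeHierRL | src/regression.py | levelup_path
-- ===== SOURCE A (Python) =====
-- def levelup_path(n, go_up):
--     path = [n]
--     while go_up:
--         if n % 2 == 0:
--             n -= 1
--         n = n // 2
--         go_up -= 1
--         path.append(n)
--     return tuple(path[::-1])
-- ===== SOURCE B (Python) =====
-- def levelup_path(n, go_up):
--     # Each step of the original maps n to (n-1)//2, so the element k steps from
--     # the end is (n+1)//2**k - 1: emit the result directly in final order,
--     # halving a precomputed power instead of branching on parity and reversing.
--     p = 1 << go_up
--     path = []
--     for _ in range(go_up + 1):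
--         path.append((n + 1) // p - 1)
--         p //= 2
--     return tuple(path)
-- ===== Notes on version B (the rewrite author's own statement) =====
-- stated objective: alternative
-- what changed: Replaced the parity-branching halve-and-accumulate while loop with a final reversal by direct emission in output order of the closed form (n+1)//2**k - 1, keeping n fixed and halving a precomputed power 2**go_up instead of mutating n.
import Mathlib
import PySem

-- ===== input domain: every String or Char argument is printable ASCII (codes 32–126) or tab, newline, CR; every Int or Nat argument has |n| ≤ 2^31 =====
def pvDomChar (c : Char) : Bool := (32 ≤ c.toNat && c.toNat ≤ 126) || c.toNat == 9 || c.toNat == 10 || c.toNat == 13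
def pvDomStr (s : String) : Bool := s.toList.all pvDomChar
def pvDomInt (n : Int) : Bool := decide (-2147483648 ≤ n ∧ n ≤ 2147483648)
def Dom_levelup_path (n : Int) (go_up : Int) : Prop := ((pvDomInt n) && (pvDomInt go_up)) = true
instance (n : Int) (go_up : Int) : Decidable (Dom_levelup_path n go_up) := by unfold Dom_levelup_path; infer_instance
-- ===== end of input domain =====

-- B emits the closed form (n+1)//2**k - 1 directly in output order (halving a precomputed power), replacing A's parity-branching halving loop plus reversal (objective: alternative).

-- ===== PORT A =====
-- the while loop, as structural recursion on the countdown fuel go_up.toNat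
-- (exact for 0 ≤ go_up, which Pre_ requires; the Python loops forever for negative go_up)
def levelupLoopA : Nat → Int → List Int → List Int
  | 0, _, path => path
  | fuel + 1, n, path =>
      let n1 := if PySem.Int.mod n 2 = 0 then n - 1 else n
      let n2 := PySem.Int.floordiv n1 2
      levelupLoopA fuel n2 (path ++ [n2])

def levelup_path (n : Int) (go_up : Int) : List Int :=
  -- path[::-1] ported as List.reverse
  (levelupLoopA go_up.toNat n [n]).reverse

-- ===== PORT B =====
-- the for loop over range(go_up + 1); state: the shrinking power p and the accumulated path
def levelupLoopB : Nat → Int → Int → List Int → List Int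
  | 0, _, _, path => path
  | c + 1, n, p, path =>
      levelupLoopB c n (PySem.Int.floordiv p 2) (path ++ [PySem.Int.floordiv (n + 1) p - 1])

def levelup_path_alt (n : Int) (go_up : Int) : List Int :=
  -- 1 << go_up ported as 2^go_up.toNat, exact for 0 ≤ go_up (Pre_; Python raises ValueError below it, where A never returns)
  levelupLoopB (go_up + 1).toNat n (2 ^ go_up.toNat) []

-- ===== PRECONDITION & SPEC =====
-- Pre_ excludes go_up < 0, on which the Python A never returns (its while loop runs forever).
def Pre_levelup_path (n : Int) (go_up : Int) : Prop := 0 ≤ go_up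
instance (n : Int) (go_up : Int) : Decidable (Pre_levelup_path n go_up) := by unfold Pre_levelup_path; infer_instance
def pvWitness_levelup_path : Int × Int := (13, 3)

def Spec_levelup_path (n : Int) (go_up : Int) (out : List Int) : Prop := out = levelup_path_alt n go_up
instance (n : Int) (go_up : Int) (out : List Int) : Decidable (Spec_levelup_path n go_up out) := by unfold Spec_levelup_path; infer_instance

-- ===== CLAIM (what is proved, stated in full; the proofs are below) =====
def Claim_equal_levelup_path : Prop := ∀ (n : Int) (go_up : Int), Dom_levelup_path n go_up → Pre_levelup_path n go_up → Spec_levelup_path n go_up (levelup_path n go_up)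

-- ===== LEMMAS AND PROOFS =====

-- the step function both programs iterate
def lpStep (n : Int) : Int := PySem.Int.floordiv (n - 1) 2

-- A's branchy body computes lpStep
theorem lpStep_eq (n : Int) :
    PySem.Int.floordiv (if PySem.Int.mod n 2 = 0 then n - 1 else n) 2 = lpStep n := by
  unfold lpStep
  rcases eq_or_ne (PySem.Int.mod n 2) 0 with h | h
  · rw [if_pos h]
  · rw [if_neg h]
    rw [PySem.Int.floordiv_eq_ediv_of_pos (by norm_num : (0:Int) < 2),
        PySem.Int.floordiv_eq_ediv_of_pos (by norm_num : (0:Int) < 2)]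
    rw [PySem.Int.mod_eq_emod_of_pos (by norm_num : (0:Int) < 2)] at h
    omega

-- closed form at position k
def lpH (n : Int) (k : Nat) : Int := PySem.Int.floordiv (n + 1) (2 ^ k) - 1

theorem lpH_zero (n : Int) : lpH n 0 = n := by
  simp [lpH, PySem.Int.floordiv]

theorem lpH_succ (n : Int) (k : Nat) : lpH n (k + 1) = lpH (lpStep n) k := by
  unfold lpH lpStep
  have h1 : PySem.Int.floordiv (n - 1) 2 + 1 = PySem.Int.floordiv (n + 1) 2 := by
    rw [PySem.Int.floordiv_eq_ediv_of_pos (by norm_num : (0:Int) < 2),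
        PySem.Int.floordiv_eq_ediv_of_pos (by norm_num : (0:Int) < 2)]
    omega
  rw [h1]
  rw [PySem.Int.floordiv_eq_ediv_of_pos (by positivity : (0:Int) < 2 ^ (k + 1)),
      PySem.Int.floordiv_eq_ediv_of_pos (by positivity : (0:Int) < 2 ^ k),
      PySem.Int.floordiv_eq_ediv_of_pos (by norm_num : (0:Int) < 2)]
  rw [Int.ediv_ediv_of_nonneg (by norm_num : (0:Int) ≤ 2)]
  rw [pow_succ, mul_comm]

-- B's list of the go_up elements before the final n, highest k first
def lpDesc (n : Int) : Nat → List Int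
  | 0 => []
  | g + 1 => lpH n (g + 1) :: lpDesc n g

theorem lpDesc_succ (n : Int) (g : Nat) :
    lpDesc n (g + 1) = lpDesc (lpStep n) g ++ [lpStep n] := by
  induction g generalizing n with
  | zero => simp [lpDesc, lpH_succ, lpH_zero]
  | succ g ih =>
      show lpH n (g + 2) :: lpDesc n (g + 1) = (lpH (lpStep n) (g + 1) :: lpDesc (lpStep n) g) ++ [lpStep n]
      rw [ih n, lpH_succ]
      simp

theorem lpLoop_reverse (g : Nat) (n : Int) (path : List Int) :
    (levelupLoopA g n path).reverse = lpDesc n g ++ path.reverse := by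
  induction g generalizing n path with
  | zero => simp [levelupLoopA, lpDesc]
  | succ g ih =>
      show (levelupLoopA g (PySem.Int.floordiv (if PySem.Int.mod n 2 = 0 then n - 1 else n) 2)
              (path ++ [PySem.Int.floordiv (if PySem.Int.mod n 2 = 0 then n - 1 else n) 2])).reverse = _
      rw [lpStep_eq, ih, lpDesc_succ]
      simp

theorem lpLoopB_desc (c : Nat) (n : Int) (path : List Int) :
    levelupLoopB (c + 1) n (2 ^ c) path = path ++ lpDesc n c ++ [n] := by
  induction c generalizing path with
  | zero =>
      show levelupLoopB 0 n (PySem.Int.floordiv (2 ^ 0) 2) (path ++ [PySem.Int.floordiv (n + 1) (2 ^ 0) - 1]) = _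
      rw [show PySem.Int.floordiv (n + 1) (2 ^ 0) = n + 1 by
            rw [pow_zero, PySem.Int.floordiv_eq_ediv_of_pos (by norm_num : (0:Int) < 1)]; omega]
      simp [levelupLoopB, lpDesc]
  | succ c ih =>
      show levelupLoopB (c + 1) n (PySem.Int.floordiv (2 ^ (c + 1)) 2)
              (path ++ [PySem.Int.floordiv (n + 1) (2 ^ (c + 1)) - 1]) = _
      rw [show PySem.Int.floordiv ((2:Int) ^ (c + 1)) 2 = 2 ^ c by
            rw [PySem.Int.floordiv_eq_ediv_of_pos (by norm_num : (0:Int) < 2), pow_succ]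
            omega]
      rw [ih]
      show _ = path ++ (lpH n (c + 1) :: lpDesc n c) ++ [n]
      simp [lpH]

-- B's port equals lpDesc with the final n appended
theorem alt_eq_desc (n : Int) (go_up : Int) (h : 0 ≤ go_up) :
    levelup_path_alt n go_up = lpDesc n go_up.toNat ++ [n] := by
  unfold levelup_path_alt
  rw [show (go_up + 1).toNat = go_up.toNat + 1 by omega, lpLoopB_desc]
  simp

-- ===== VERDICT (by name: the statement is the Claim_ definition above) =====
theorem levelup_path_spec : Claim_equal_levelup_path := by
  intro n go_up _ hpre
  unfold Spec_levelup_path levelup_path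
  rw [lpLoop_reverse, alt_eq_desc n go_up hpre]
  simp
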